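-- pv_equiv track=rewrite | github.com/nicola-decao/diffmask | scripts/preprocessing_sst.py | get_offsets_spaces
-- ===== SOURCE A (Python) =====
-- def get_offsets_spaces(sent):
--     offsets_spaces = []
--     i, j = 0, 0
--     while j < len(sent):
--         if sent[j] == " ":
--             offsets_spaces.append((i, j))
--             i = j + 1
--         j += 1
--     offsets_spaces.append((i, j))
--     return offsets_spaces
-- ===== SOURCE B (Python) =====
-- def get_offsets_spaces(sent):
--     offsets_spaces = []
--     pos = 0
--     for tok in sent.split(" "):
--         offsets_spaces.append((pos, pos + len(tok)))
--         pos += len(tok) + 1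
--     return offsets_spaces
-- ===== Notes on version B (the rewrite author's own statement) =====
-- stated objective: faster
-- what changed: Replaces A's character-by-character index scan with mutable segment-start bookkeeping by a single str.split on the space separator followed by one accumulation of token lengths into running offsets.
import Mathlib
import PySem

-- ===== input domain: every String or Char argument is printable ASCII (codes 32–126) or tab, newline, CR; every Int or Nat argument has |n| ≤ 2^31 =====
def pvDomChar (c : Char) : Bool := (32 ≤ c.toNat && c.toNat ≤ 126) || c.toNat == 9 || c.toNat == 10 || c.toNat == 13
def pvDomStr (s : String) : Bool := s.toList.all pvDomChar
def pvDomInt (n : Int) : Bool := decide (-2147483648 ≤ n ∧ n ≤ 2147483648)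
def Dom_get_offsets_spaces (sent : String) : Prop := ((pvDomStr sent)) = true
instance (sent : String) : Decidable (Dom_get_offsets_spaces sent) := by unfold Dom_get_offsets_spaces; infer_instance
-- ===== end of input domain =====

-- B replaces A's character-by-character index scan with split(" ") followed by one
-- accumulation of token lengths into running offsets (objective: simpler).

-- ===== PORT A =====
-- A's while loop over j with segment start i and accumulator list, step for step.
def getOffsetsLoopA (acc : List (Int × Int)) (i j : Int) : List Char → List (Int × Int)
  | [] => acc ++ [(i, j)]
  | c :: rest =>
    if c = ' ' then getOffsetsLoopA (acc ++ [(i, j)]) (j + 1) (j + 1) rest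
    else getOffsetsLoopA acc i (j + 1) rest

def get_offsets_spaces (sent : String) : List (Int × Int) :=
  getOffsetsLoopA [] 0 0 sent.toList

-- ===== PORT B =====
-- B's for-loop over sent.split(" "): append (pos, pos+len) and advance pos.
def getOffsetsWalkB (st : List (Int × Int) × Int) (tok : String) : List (Int × Int) × Int :=
  (st.1 ++ [(st.2, st.2 + (PySem.Str.len tok : Int))], st.2 + (PySem.Str.len tok : Int) + 1)

def get_offsets_spaces_alt (sent : String) : List (Int × Int) :=
  (((PySem.Str.split? sent " ").getD []).foldl getOffsetsWalkB ([], 0)).1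

-- ===== PRECONDITION & SPEC =====
def Spec_get_offsets_spaces (sent : String) (out : List (Int × Int)) : Prop := out = get_offsets_spaces_alt sent
instance (sent : String) (out : List (Int × Int)) : Decidable (Spec_get_offsets_spaces sent out) := by unfold Spec_get_offsets_spaces; infer_instance

-- ===== CLAIM (what is proved, stated in full; the proofs are below) =====
def Claim_equal_get_offsets_spaces : Prop := ∀ (sent : String), Dom_get_offsets_spaces sent → Spec_get_offsets_spaces sent (get_offsets_spaces sent)

-- ===== LEMMAS AND PROOFS =====

-- The non-accumulator shape of A's loop.
def pureA (i j : Int) : List Char → List (Int × Int)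
  | [] => [(i, j)]
  | c :: rest =>
    if c = ' ' then (i, j) :: pureA (j + 1) (j + 1) rest
    else pureA i (j + 1) rest

theorem getOffsetsLoopA_eq (cs : List Char) : ∀ (acc : List (Int × Int)) (i j : Int),
    getOffsetsLoopA acc i j cs = acc ++ pureA i j cs := by
  induction cs with
  | nil => intro acc i j; simp [getOffsetsLoopA, pureA]
  | cons c rest ih =>
    intro acc i j
    by_cases h : c = ' ' <;> simp [getOffsetsLoopA, pureA, h, ih]

-- Simple recursive characterisation of splitOn on a single-space separator.
def splitSp : List Char → List (List Char)
  | [] => [[]]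
  | c :: rest =>
    if c = ' ' then [] :: splitSp rest
    else
      match splitSp rest with
      | t :: ts => (c :: t) :: ts
      | [] => [[c]]

theorem splitSp_ne_nil (cs : List Char) : splitSp cs ≠ [] := by
  cases cs with
  | nil => simp [splitSp]
  | cons c rest =>
    simp only [splitSp]
    split <;> [simp; skip]
    split <;> simp

def consFirst (cur : List Char) : List (List Char) → List (List Char)
  | t :: ts => (cur ++ t) :: ts
  | [] => [cur]

theorem splitOn_go_eq (fuel : Nat) : ∀ (cs cur : List Char) (acc : List (List Char)),
    cs.length ≤ fuel →
    PySem.Chars.splitOn.go [' '] fuel cs cur acc = acc.reverse ++ consFirst cur.reverse (splitSp cs) := by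
  induction fuel with
  | zero =>
    intro cs cur acc h
    have : cs = [] := by cases cs <;> simp_all
    subst this
    simp [PySem.Chars.splitOn.go, splitSp, consFirst]
  | succ fuel ih =>
    intro cs cur acc h
    cases cs with
    | nil => simp [PySem.Chars.splitOn.go, splitSp, consFirst]
    | cons c rest =>
      by_cases hc : c = ' '
      · subst hc
        have hpre : List.isPrefixOf [' '] (' ' :: rest) = true := by
          simp [List.isPrefixOf]
        rw [PySem.Chars.splitOn.go]
        simp only [hpre, if_pos]
        have : List.drop (List.length [' ']) (' ' :: rest) = rest := by simp
        rw [this, ih rest [] (cur.reverse :: acc) (by simpa using Nat.le_of_succ_le_succ h)]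
        obtain ⟨t, ts, hts⟩ : ∃ t ts, splitSp rest = t :: ts := by
          cases hx : splitSp rest with
          | nil => exact absurd hx (splitSp_ne_nil rest)
          | cons t ts => exact ⟨t, ts, rfl⟩
        simp [splitSp, hts, consFirst]
      · have hpre : List.isPrefixOf [' '] (c :: rest) = false := by
          simp [List.isPrefixOf]; exact fun h => hc h.symm
        rw [PySem.Chars.splitOn.go]
        simp only [hpre, Bool.false_eq_true, if_neg, not_false_iff]
        rw [ih rest (c :: cur) acc (by simpa using Nat.le_of_succ_le_succ h)]
        obtain ⟨t, ts, hts⟩ : ∃ t ts, splitSp rest = t :: ts := by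
          cases hx : splitSp rest with
          | nil => exact absurd hx (splitSp_ne_nil rest)
          | cons t ts => exact ⟨t, ts, rfl⟩
        simp [splitSp, hts, consFirst, hc]

theorem splitOn_eq_splitSp (cs : List Char) :
    PySem.Chars.splitOn cs [' '] = splitSp cs := by
  have h := splitOn_go_eq (cs.length + 1) cs [] [] (by omega)
  have hcf : consFirst [] (splitSp cs) = splitSp cs := by
    obtain ⟨t, ts, hts⟩ : ∃ t ts, splitSp cs = t :: ts := by
      cases hx : splitSp cs with
      | nil => exact absurd hx (splitSp_ne_nil cs)
      | cons t ts => exact ⟨t, ts, rfl⟩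
    simp [hts, consFirst]
  simpa [PySem.Chars.splitOn, hcf] using h

-- The non-accumulator shape of B's walk, over char-list tokens.
def walkP (pos : Int) : List (List Char) → List (Int × Int)
  | [] => []
  | t :: ts => (pos, pos + (t.length : Int)) :: walkP (pos + (t.length : Int) + 1) ts

theorem foldl_walk_eq (toks : List String) : ∀ (acc : List (Int × Int)) (pos : Int),
    (toks.foldl getOffsetsWalkB (acc, pos)).1 = acc ++ walkP pos (toks.map String.toList) := by
  induction toks with
  | nil => intro acc pos; simp [walkP]
  | cons t ts ih =>
    intro acc pos
    simp [List.foldl, getOffsetsWalkB, ih, walkP, PySem.Str.len]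

-- Core: A's scan from segment start i = current index j equals B's walk.
theorem pureA_eq_walkP (cs : List Char) : ∀ (j : Int),
    pureA j j cs =
      match splitSp cs with
      | t :: ts => (j, j + (t.length : Int)) :: walkP (j + (t.length : Int) + 1) ts
      | [] => [] := by
  -- strengthened: arbitrary segment start i, current index j, with j - i = consumed prefix
  suffices h : ∀ (cs : List Char) (i j : Int),
      pureA i j cs =
        match splitSp cs with
        | t :: ts => (i, j + (t.length : Int)) :: walkP (j + (t.length : Int) + 1) ts
        | [] => [] by
    intro j; exact h cs j j
  intro cs
  induction cs with
  | nil => intro i j; simp [pureA, splitSp, walkP]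
  | cons c rest ih =>
    intro i j
    by_cases hc : c = ' '
    · subst hc
      have := ih (j + 1) (j + 1)
      obtain ⟨t, ts, hts⟩ : ∃ t ts, splitSp rest = t :: ts := by
        cases hx : splitSp rest with
        | nil => exact absurd hx (splitSp_ne_nil rest)
        | cons t ts => exact ⟨t, ts, rfl⟩
      simp only [hts] at this
      simp [pureA, splitSp, hts, this, walkP]
    · obtain ⟨t, ts, hts⟩ : ∃ t ts, splitSp rest = t :: ts := by
        cases hx : splitSp rest with
        | nil => exact absurd hx (splitSp_ne_nil rest)
        | cons t ts => exact ⟨t, ts, rfl⟩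
      have := ih i (j + 1)
      simp only [hts] at this
      simp only [pureA, splitSp, hts, hc, this]
      have harith : j + 1 + (t.length : Int) = j + ((c :: t).length : Int) := by
        simp; ring
      simp [harith]

-- ===== VERDICT (by name: the statement is the Claim_ definition above) =====
theorem get_offsets_spaces_spec : Claim_equal_get_offsets_spaces := by
  intro sent _
  unfold Spec_get_offsets_spaces get_offsets_spaces get_offsets_spaces_alt
  -- resolve sent.split(" ")
  have hmap := PySem.Str.split?_map sent " "
  have hsp : PySem.Chars.split? sent.toList " ".toList =
      some (PySem.Chars.splitOn sent.toList [' ']) := by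
    simp [PySem.Chars.split?]
  cases htk : PySem.Str.split? sent " " with
  | none => rw [htk] at hmap; rw [hsp] at hmap; simp at hmap
  | some toks =>
    rw [htk] at hmap; rw [hsp] at hmap
    have htoks : toks.map String.toList = PySem.Chars.splitOn sent.toList [' '] := by
      simpa using hmap
    simp only [Option.getD_some]
    rw [foldl_walk_eq toks [] 0, htoks, splitOn_eq_splitSp,
        getOffsetsLoopA_eq, pureA_eq_walkP]
    obtain ⟨t, ts, hts⟩ : ∃ t ts, splitSp sent.toList = t :: ts := by
      cases hx : splitSp sent.toList with
      | nil => exact absurd hx (splitSp_ne_nil sent.toList)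
      | cons t ts => exact ⟨t, ts, rfl⟩
    simp [hts, walkP]
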